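-- pv_equiv track=rewrite | github.com/sec-js/cartography | cartography/intel/tailscale/grants.py | _build_user_to_devices_map
-- ===== SOURCE A (Python) =====
-- from typing import Any
--
-- def _build_user_to_devices_map(
--     devices: list[dict[str, Any]],
-- ) -> dict[str, list[str]]:
--     """Build a mapping from user login name to list of their device IDs."""
--     user_to_devices: dict[str, list[str]] = {}
--     for device in devices:
--         user = device.get("user")
--         if user:
--             user_to_devices.setdefault(user, []).append(device["nodeId"])
--     return user_to_devices
-- ===== SOURCE B (Python) =====
-- def _build_user_to_devices_map(
--     devices: list,
-- ) -> dict: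
--     """Build a mapping from user login name to list of their device IDs."""
--     users = list(dict.fromkeys(d["user"] for d in devices if d.get("user")))
--     return {u: [d["nodeId"] for d in devices if d.get("user") == u] for u in users}
-- ===== Notes on version B (the rewrite author's own statement) =====
-- stated objective: alternative
-- what changed: Replaced the single-pass dict-with-setdefault accumulation by a two-phase comprehension: first collect the distinct truthy users in first-appearance order, then build each user's device list with a direct per-user comprehension over the devices.
import Mathlib
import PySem

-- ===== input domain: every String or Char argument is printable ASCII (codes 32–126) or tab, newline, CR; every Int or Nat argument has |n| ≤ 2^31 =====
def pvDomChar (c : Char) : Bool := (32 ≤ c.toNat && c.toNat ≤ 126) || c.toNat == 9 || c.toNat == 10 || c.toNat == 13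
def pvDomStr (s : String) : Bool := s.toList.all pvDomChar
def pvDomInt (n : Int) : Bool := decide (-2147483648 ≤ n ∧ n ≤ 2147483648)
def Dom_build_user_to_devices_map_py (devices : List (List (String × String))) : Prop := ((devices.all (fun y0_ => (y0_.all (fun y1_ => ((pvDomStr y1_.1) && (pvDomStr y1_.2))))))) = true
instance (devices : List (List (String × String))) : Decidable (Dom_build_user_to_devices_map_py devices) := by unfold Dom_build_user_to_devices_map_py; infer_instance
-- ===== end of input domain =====

-- B replaces A's single-pass setdefault-dict accumulation by a two-phase comprehension
-- (distinct truthy users in first-appearance order, then a per-user device-list comprehension);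
-- an alternative decomposition of the same result, not claimed faster.

-- ===== PORT A =====
-- literal transliteration of A: one fold over devices, grouping into an insertion-ordered dict
def build_user_to_devices_map_py (devices : List (List (String × String))) : List (String × List String) :=
  (devices.foldl (fun acc device =>
      match (PySem.Dict.mk device).get? "user" with
      | some user =>
          if user = "" then acc      -- falsy user: skipped
          else
            match (PySem.Dict.mk device).get? "nodeId" with
            | some nid => acc.modify user [] (· ++ [nid])   -- setdefault(user, []).append(nid)
            | none => acc            -- Python raises KeyError here; excluded by Pre_
      | none => acc) PySem.Dict.empty).items

-- ===== PORT B =====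
-- transliteration of Source B: users = list(dict.fromkeys(...)); then a per-user comprehension
-- (the dict comprehension's keys `users` are distinct, so its items are this map)
def build_user_to_devices_map_py_alt (devices : List (List (String × String))) : List (String × List String) :=
  let users : List String := PySem.List.dedup (devices.filterMap (fun device =>
      match (PySem.Dict.mk device).get? "user" with
      | some u => if u = "" then none else some u
      | none => none))
  users.map (fun u => (u,
    devices.filterMap (fun device =>
      if (PySem.Dict.mk device).get? "user" = some u
      then (PySem.Dict.mk device).get? "nodeId"   -- Python raises KeyError if missing; Pre_ excludes that
      else none)))

-- ===== PRECONDITION & SPEC =====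
-- Pre_ excludes exactly the inputs where Python A raises KeyError: a device with a truthy
-- "user" but no "nodeId" key (B raises KeyError there too).
def Pre_build_user_to_devices_map_py (devices : List (List (String × String))) : Prop :=
  ∀ device ∈ devices, (PySem.Dict.mk device).getD "user" "" ≠ "" →
    (PySem.Dict.mk device).contains "nodeId" = true
instance (devices : List (List (String × String))) : Decidable (Pre_build_user_to_devices_map_py devices) := by unfold Pre_build_user_to_devices_map_py; infer_instance

def pvWitness_build_user_to_devices_map_py : (List (List (String × String))) :=
  [[("user", "alice"), ("nodeId", "n1")], [("user", "bob"), ("nodeId", "n2")],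
   [("nodeId", "n3")], [("user", ""), ("nodeId", "n4")], [("user", "alice"), ("nodeId", "n5")]]

def Spec_build_user_to_devices_map_py (devices : List (List (String × String))) (out : List (String × List String)) : Prop := out = build_user_to_devices_map_py_alt devices
instance (devices : List (List (String × String))) (out : List (String × List String)) : Decidable (Spec_build_user_to_devices_map_py devices out) := by unfold Spec_build_user_to_devices_map_py; infer_instance

-- ===== CLAIM (what is proved, stated in full; the proofs are below) =====
def Claim_equal_build_user_to_devices_map_py : Prop := ∀ (devices : List (List (String × String))), Dom_build_user_to_devices_map_py devices → Pre_build_user_to_devices_map_py devices → Spec_build_user_to_devices_map_py devices (build_user_to_devices_map_py devices)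

-- ===== LEMMAS AND PROOFS =====

-- the (user, nodeId) pair a device contributes to A's dict (none = skipped / would raise)
def pvPair? (device : List (String × String)) : Option (String × String) :=
  match (PySem.Dict.mk device).get? "user" with
  | some u =>
      if u = "" then none
      else match (PySem.Dict.mk device).get? "nodeId" with
           | some nid => some (u, nid)
           | none => none
  | none => none

-- the truthy user a device contributes to B's `users` list
def pvUser? (device : List (String × String)) : Option String :=
  match (PySem.Dict.mk device).get? "user" with
  | some u => if u = "" then none else some u
  | none => none

theorem pvPair?_eq_some (d : List (String × String)) (p : String × String) (h : pvPair? d = some p) :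
    (PySem.Dict.mk d).get? "user" = some p.1 ∧ p.1 ≠ "" ∧ (PySem.Dict.mk d).get? "nodeId" = some p.2 := by
  unfold pvPair? at h
  cases hg : (PySem.Dict.mk d).get? "user" with
  | none => rw [hg] at h; exact absurd h (by simp)
  | some u =>
      rw [hg] at h; dsimp only at h
      by_cases he : u = ""
      · rw [if_pos he] at h; exact absurd h (by simp)
      · rw [if_neg he] at h
        cases hn : (PySem.Dict.mk d).get? "nodeId" with
        | none => rw [hn] at h; exact absurd h (by simp)
        | some nid =>
            rw [hn] at h
            obtain rfl : (u, nid) = p := by simpa using h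
            exact ⟨rfl, he, rfl⟩

-- pointwise form of Pre_: a truthy user forces a present nodeId
theorem pvUser_eq_pair (d : List (String × String))
    (hd : (PySem.Dict.mk d).getD "user" "" ≠ "" → (PySem.Dict.mk d).contains "nodeId" = true) :
    pvUser? d = (pvPair? d).map (·.1) := by
  unfold pvUser? pvPair?
  cases hg : (PySem.Dict.mk d).get? "user" with
  | none => rfl
  | some u =>
      by_cases he : u = ""
      · simp [he]
      · have htr : (PySem.Dict.mk d).getD "user" "" ≠ "" := by
          rw [PySem.Dict.getD_eq_get?_getD, hg]; simpa using he
        have hc := hd htr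
        rw [PySem.Dict.contains_eq_isSome_get?] at hc
        cases hn : (PySem.Dict.mk d).get? "nodeId" with
        | none => rw [hn] at hc; simp at hc
        | some nid => simp [he]

theorem pvA_step_eq (acc : PySem.Dict String (List String)) (d : List (String × String)) :
    (match (PySem.Dict.mk d).get? "user" with
     | some user =>
         if user = "" then acc
         else
           match (PySem.Dict.mk d).get? "nodeId" with
           | some nid => acc.modify user [] (· ++ [nid])
           | none => acc
     | none => acc)
    = (match pvPair? d with
       | some p => acc.modify p.1 [] (· ++ [p.2])
       | none => acc) := by
  unfold pvPair?
  cases (PySem.Dict.mk d).get? "user" with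
  | none => rfl
  | some u =>
      by_cases he : u = ""
      · simp [he]
      · cases (PySem.Dict.mk d).get? "nodeId" with
        | none => simp [he]
        | some nid => simp [he]

theorem pvA_fold_eq (devices : List (List (String × String))) (acc : PySem.Dict String (List String)) :
    devices.foldl (fun acc device =>
      match (PySem.Dict.mk device).get? "user" with
      | some user =>
          if user = "" then acc
          else
            match (PySem.Dict.mk device).get? "nodeId" with
            | some nid => acc.modify user [] (· ++ [nid])
            | none => acc
      | none => acc) acc
    = (devices.filterMap pvPair?).foldl (fun acc p => acc.modify p.1 [] (· ++ [p.2])) acc := by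
  induction devices generalizing acc with
  | nil => rfl
  | cons d rest ih =>
      simp only [List.foldl_cons, List.filterMap_cons]
      rw [pvA_step_eq acc d]
      cases pvPair? d with
      | none => exact ih acc
      | some p => simp [ih]

-- under Pre_, every device with a truthy user also contributes a pair,
-- so the key list of A's pairs is exactly B's list of truthy users
theorem pvKeys_eq (devices : List (List (String × String)))
    (hpre : Pre_build_user_to_devices_map_py devices) :
    (devices.filterMap pvPair?).map (·.1) = devices.filterMap pvUser? := by
  induction devices with
  | nil => rfl
  | cons d rest ih =>
      have hd := hpre d (List.mem_cons_self ..)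
      have hrest : Pre_build_user_to_devices_map_py rest := fun x hx => hpre x (List.mem_cons_of_mem _ hx)
      simp only [List.filterMap_cons]
      rw [pvUser_eq_pair d hd]
      cases pvPair? d with
      | none => simpa using ih hrest
      | some p => simp [ih hrest]

-- B's inner comprehension for a truthy user u lists the nodeIds of A's pairs keyed u
theorem pvInner_eq (devices : List (List (String × String))) (u : String) (hu : u ≠ "")
    (hpre : Pre_build_user_to_devices_map_py devices) :
    ((devices.filterMap pvPair?).filter (fun p => p.1 == u)).map (·.2)
    = devices.filterMap (fun device =>
        if (PySem.Dict.mk device).get? "user" = some u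
        then (PySem.Dict.mk device).get? "nodeId" else none) := by
  induction devices with
  | nil => rfl
  | cons d rest ih =>
      have hd := hpre d (List.mem_cons_self ..)
      have hrest : Pre_build_user_to_devices_map_py rest := fun x hx => hpre x (List.mem_cons_of_mem _ hx)
      simp only [List.filterMap_cons]
      cases hp : pvPair? d with
      | some p =>
          obtain ⟨hg, hne, hn⟩ := pvPair?_eq_some d p hp
          by_cases hpu : p.1 = u
          · simp [hpu, hg, hn, ih hrest]
          · simp [hpu, hg, ih hrest]
      | none =>
          unfold pvPair? at hp
          cases hg : (PySem.Dict.mk d).get? "user" with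
          | none => simp [ih hrest]
          | some u' =>
              rw [hg] at hp; dsimp only at hp
              by_cases he : u' = ""
              · have : ¬ ((u' : String) = u) := by rw [he]; exact fun h => hu h.symm
                simp [this, ih hrest]
              · have htr : (PySem.Dict.mk d).getD "user" "" ≠ "" := by
                  rw [PySem.Dict.getD_eq_get?_getD, hg]; simpa using he
                have hc := hd htr
                rw [PySem.Dict.contains_eq_isSome_get?] at hc
                rw [if_neg he] at hp
                cases hn : (PySem.Dict.mk d).get? "nodeId" with
                | none => rw [hn] at hc; simp at hc
                | some nid => rw [hn] at hp; exact absurd hp (by simp)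

-- ===== VERDICT (by name: the statement is the Claim_ definition above) =====
theorem build_user_to_devices_map_py_spec : Claim_equal_build_user_to_devices_map_py := by
  intro devices _ hpre
  unfold Spec_build_user_to_devices_map_py build_user_to_devices_map_py build_user_to_devices_map_py_alt
  rw [pvA_fold_eq]
  set L := devices.filterMap pvPair? with hL
  have hnodup : ((L.foldl (fun acc p => acc.modify p.1 [] (· ++ [p.2])) PySem.Dict.empty).keys).Nodup := by
    exact PySem.Dict.nodup_keys_foldl_modify_key L (·.1) [] (fun acc p => (· ++ [p.2])) PySem.Dict.empty
      (by simp [PySem.Dict.keys_empty])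
  rw [PySem.Dict.items_eq_map_keys _ hnodup []]
  have hkeys : (L.foldl (fun acc p => acc.modify p.1 [] (· ++ [p.2])) PySem.Dict.empty).keys
      = PySem.Set.ofList (L.map (·.1)) := by
    rw [PySem.Dict.keys_foldl_modify_key]
    simp [PySem.Dict.keys_empty, PySem.Set.update_nil_left]
  rw [hkeys, hL, pvKeys_eq devices hpre]
  have husers : devices.filterMap pvUser? = devices.filterMap (fun device =>
      match (PySem.Dict.mk device).get? "user" with
      | some u => if u = "" then none else some u
      | none => none) := rfl
  rw [husers]
  simp only [PySem.List.dedup_eq_ofList]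
  apply List.map_congr_left
  intro u hmem
  have humem : u ∈ devices.filterMap pvUser? := by
    rw [husers]    -- fold B's lambda back to pvUser?
    exact (PySem.Set.mem_ofList _ u).mp hmem
  have hune : u ≠ "" := by
    rcases List.mem_filterMap.mp humem with ⟨d, _, hd⟩
    unfold pvUser? at hd
    cases hg : (PySem.Dict.mk d).get? "user" with
    | none => rw [hg] at hd; exact absurd hd (by simp)
    | some u' =>
        rw [hg] at hd; dsimp only at hd
        by_cases he : u' = ""
        · rw [if_pos he] at hd; exact absurd hd (by simp)
        · rw [if_neg he] at hd; exact (Option.some.inj hd) ▸ he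
  congr 1
  have hgetD : (L.foldl (fun acc p => acc.modify p.1 [] (· ++ [p.2])) PySem.Dict.empty).getD u []
      = (L.filter (fun p => p.1 == u)).map (·.2) := by
    rw [PySem.Dict.getD_foldl_modify_append]
    simp [PySem.Dict.getD_empty]
  rw [hgetD, hL, pvInner_eq devices u hune hpre]
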